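-- pv_equiv track=rewrite | github.com/kpsota-clevermaps/streamlit-demo-app | app.py | query_result_to_pd_data
-- ===== SOURCE A (Python) =====
-- def query_result_to_pd_data(metric_results):
--
--     data = {}
--     for mr in metric_results:
--         for prop in list(mr['content'].keys()):
--             if prop not in data:
--                 data[prop] = []
--             data[prop].append(mr['content'][prop])
--
--     return data
-- ===== SOURCE B (Python) =====
-- def query_result_to_pd_data(metric_results):
--     contents = [mr['content'] for mr in metric_results]
--     keys = list(dict.fromkeys(k for c in contents for k in c))
--     return {k: [c[k] for c in contents if k in c] for k in keys}
-- ===== Notes on version B (the rewrite author's own statement) =====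
-- stated objective: alternative
-- what changed: B transposes the traversal: one pass collects the property keys in first-appearance order (dict.fromkeys dedup), then a column-major dict comprehension gathers each key's values across all records, instead of A's record-major loop mutating a growing dict.
import Mathlib
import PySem

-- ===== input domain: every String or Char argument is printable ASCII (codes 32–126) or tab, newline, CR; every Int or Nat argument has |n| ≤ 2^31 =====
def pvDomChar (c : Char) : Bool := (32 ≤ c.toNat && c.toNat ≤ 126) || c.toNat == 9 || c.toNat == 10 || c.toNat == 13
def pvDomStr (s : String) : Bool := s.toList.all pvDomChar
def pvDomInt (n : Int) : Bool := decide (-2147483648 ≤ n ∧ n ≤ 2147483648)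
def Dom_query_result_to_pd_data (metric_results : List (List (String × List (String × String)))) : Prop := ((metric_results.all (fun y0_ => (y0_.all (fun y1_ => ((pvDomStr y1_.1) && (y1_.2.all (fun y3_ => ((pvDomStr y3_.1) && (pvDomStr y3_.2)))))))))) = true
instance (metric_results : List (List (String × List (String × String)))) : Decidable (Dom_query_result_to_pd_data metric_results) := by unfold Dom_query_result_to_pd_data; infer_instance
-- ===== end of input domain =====

-- B pivots column-major (collect keys once, then gather each column) instead of A's
-- record-major dict mutation; equivalence of the return values is proved on Pre_
-- (every record has a 'content' key — Python A raises KeyError otherwise).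

-- shared helper: the Python expression mr['content'] as a dict (both Pythons evaluate it);
-- Pre_ guarantees the lookup succeeds, so the .getD [] default is never taken on Pre_.
def pvContent (mr : List (String × List (String × String))) : PySem.Dict String String :=
  PySem.Dict.ofList (((PySem.Dict.ofList mr).get? "content").getD [])

-- ===== PORT A =====
-- 'if prop not in data: data[prop] = []' followed by 'data[prop].append(v)' is
-- d[prop] = d.get(prop, []) + [v], i.e. Dict.modify prop [] (· ++ [v]).
-- mr['content'][prop] is ported as getD with unreachable default: prop ∈ c.keys.
def query_result_to_pd_data (metric_results : List (List (String × List (String × String)))) : List (String × List String) :=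
  (metric_results.foldl
    (fun data mr =>
      let c := pvContent mr
      c.keys.foldl
        (fun data prop => data.modify prop ([] : List String) (fun l => l ++ [c.getD prop ""]))
        data)
    PySem.Dict.empty).items

-- ===== PORT B =====
def query_result_to_pd_data_alt (metric_results : List (List (String × List (String × String)))) : List (String × List String) :=
  let contents := metric_results.map pvContent
  let keys := PySem.List.dedup (contents.flatMap (fun c => c.keys))
  keys.map (fun k => (k, (contents.filter (fun c => c.contains k)).map (fun c => c.getD k "")))

-- ===== PRECONDITION & SPEC =====
-- Pre_ excludes exactly the inputs where Python A raises KeyError: a record without a 'content' key.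
def Pre_query_result_to_pd_data (metric_results : List (List (String × List (String × String)))) : Prop :=
  ∀ mr ∈ metric_results, "content" ∈ mr.map Prod.fst
instance (metric_results : List (List (String × List (String × String)))) : Decidable (Pre_query_result_to_pd_data metric_results) := by unfold Pre_query_result_to_pd_data; infer_instance

def pvWitness_query_result_to_pd_data : (List (List (String × List (String × String)))) :=
  [[("content", [("a", "1"), ("b", "2")])], [("content", [("b", "3")])]]

def Spec_query_result_to_pd_data (metric_results : List (List (String × List (String × String)))) (out : List (String × List String)) : Prop := out = query_result_to_pd_data_alt metric_results
instance (metric_results : List (List (String × List (String × String)))) (out : List (String × List String)) : Decidable (Spec_query_result_to_pd_data metric_results out) := by unfold Spec_query_result_to_pd_data; infer_instance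

-- ===== CLAIM (what is proved, stated in full; the proofs are below) =====
def Claim_equal_query_result_to_pd_data : Prop := ∀ (metric_results : List (List (String × List (String × String)))), Dom_query_result_to_pd_data metric_results → Pre_query_result_to_pd_data metric_results → Spec_query_result_to_pd_data metric_results (query_result_to_pd_data metric_results)

-- ===== LEMMAS AND PROOFS =====

-- the accumulation step of A's loops
def pvStep (d : PySem.Dict String (List String)) (p : String × String) : PySem.Dict String (List String) :=
  d.modify p.1 ([] : List String) (fun l => l ++ [p.2])

-- A's inner loop over c.keys is the same fold over c.items (keys are nodup for ofList dicts)
theorem pv_inner (c : PySem.Dict String String) (hn : c.keys.Nodup)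
    (d : PySem.Dict String (List String)) :
    c.keys.foldl (fun d prop => d.modify prop ([] : List String) (fun l => l ++ [c.getD prop ""])) d
      = c.items.foldl pvStep d := by
  have hk : c.keys = c.items.map Prod.fst := rfl
  rw [hk, List.foldl_map]
  refine PySem.List.foldl_congr_mem' _ _ _ _ (fun p hp acc => ?_)
  have : c.getD p.1 "" = p.2 := PySem.Dict.getD_of_mem_items c hp hn ""
  simp [pvStep, this]

-- folding over a flatMap is the nested fold
theorem pv_foldl_flatMap {α β γ : Type} (l : List α) (f : α → List β)
    (g : γ → β → γ) (init : γ) :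
    (l.flatMap f).foldl g init = l.foldl (fun acc x => (f x).foldl g acc) init := by
  induction l generalizing init with
  | nil => rfl
  | cons a t ih => simp [List.flatMap_cons, List.foldl_append, ih]

-- on a list with nodup first components, filtering on the first component of a member yields it alone
theorem pv_filter_fst_nodup {ν : Type} (l : List (String × ν)) (k : String)
    (hn : (l.map Prod.fst).Nodup) (v : ν) (hm : (k, v) ∈ l) :
    l.filter (fun p => p.1 == k) = [(k, v)] := by
  induction l with
  | nil => cases hm
  | cons a t ih =>
    simp only [List.map_cons, List.nodup_cons, List.mem_map] at hn
    rcases hn with ⟨ha, hnt⟩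
    rcases List.mem_cons.1 hm with h | h
    · subst h
      simp only [List.filter_cons, beq_self_eq_true, if_pos]
      have : t.filter (fun p => p.1 == k) = [] := by
        refine List.filter_eq_nil_iff.2 (fun p hp => ?_)
        simp only [beq_iff_eq]
        exact fun hpk => ha ⟨p, hp, hpk⟩
      simp [this]
    · have hak : ¬ a.1 = k := by
        intro he
        exact ha ⟨(k, v), h, by rw [he]⟩
      simp only [List.filter_cons, beq_iff_eq, hak, ite_false]
      exact ih hnt h
    
-- the one-key column of a nodup-keyed dict, extracted from its items
theorem pv_column (c : PySem.Dict String String) (hn : c.keys.Nodup) (k : String) :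
    (c.items.filter (fun p => p.1 == k)).map Prod.snd
      = (if c.contains k then [c.getD k ""] else []) := by
  by_cases h : c.contains k = true
  · rcases (PySem.Dict.contains_eq_isSome_get? (d := c) (k := k) ▸ h : (c.get? k).isSome = true) with hs
    rcases Option.isSome_iff_exists.1 hs with ⟨v, hv⟩
    have hm : (k, v) ∈ c.items := PySem.Dict.mem_items_of_get?_eq_some _ hv
    rw [pv_filter_fst_nodup c.items k hn v hm]
    have hg : c.getD k "" = v := PySem.Dict.getD_of_get?_eq_some c "" hv
    simp [h, hg]
  · have h' : c.contains k = false := by simpa using h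
    have : c.items.filter (fun p => p.1 == k) = [] := by
      refine List.filter_eq_nil_iff.2 (fun p hp => ?_)
      simp only [beq_iff_eq]
      intro hpk
      have : p.1 ∈ c.keys := List.mem_map_of_mem hp
      rw [hpk] at this
      rw [PySem.Dict.contains_eq_decide_mem_keys] at h'
      simp at h'
      exact h' this
    simp [this, h']

-- the whole column of a key across a list of nodup-keyed dicts
theorem pv_cols (cs : List (PySem.Dict String String)) (h : ∀ c ∈ cs, c.keys.Nodup) (k : String) :
    ((cs.flatMap PySem.Dict.items).filter (fun p => p.1 == k)).map Prod.snd
      = (cs.filter (fun c => c.contains k)).map (fun c => c.getD k "") := by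
  induction cs with
  | nil => rfl
  | cons a t ih =>
    have ha := pv_column a (h a (List.mem_cons_self)) k
    have ht := ih (fun c hc => h c (List.mem_cons_of_mem a hc))
    rw [List.flatMap_cons, List.filter_append, List.map_append, ha, List.filter_cons]
    by_cases hc : a.contains k = true
    · simp [hc, ht]
    · simp [(by simpa using hc : a.contains k = false), ht]

-- ===== VERDICT (by name: the statement is the Claim_ definition above) =====
theorem query_result_to_pd_data_spec : Claim_equal_query_result_to_pd_data := by
  intro metric_results _ _
  show query_result_to_pd_data metric_results = query_result_to_pd_data_alt metric_results
  unfold query_result_to_pd_data query_result_to_pd_data_alt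
  set cs := metric_results.map pvContent with hcs
  set ps := cs.flatMap PySem.Dict.items with hps
  have hcn : ∀ c ∈ cs, c.keys.Nodup := by
    intro c hc
    rcases List.mem_map.1 hc with ⟨mr, _, rfl⟩
    exact PySem.Dict.nodup_keys_ofList _
  -- A's double loop is a single fold over the flattened items
  have hA : metric_results.foldl
      (fun data mr =>
        let c := pvContent mr
        c.keys.foldl
          (fun data prop => data.modify prop ([] : List String) (fun l => l ++ [c.getD prop ""]))
          data)
      PySem.Dict.empty = ps.foldl pvStep PySem.Dict.empty := by
    rw [hps, pv_foldl_flatMap, hcs, List.foldl_map]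
    refine PySem.List.foldl_congr_mem' _ _ _ _ (fun mr _ acc => ?_)
    exact pv_inner (pvContent mr) (PySem.Dict.nodup_keys_ofList _) acc
  rw [hA]
  set D := ps.foldl pvStep PySem.Dict.empty with hD
  -- keys of the accumulated dict
  have hkeys : D.keys = PySem.List.dedup (cs.flatMap (fun c => c.keys)) := by
    rw [hD]
    show (ps.foldl (fun d (p : String × String) =>
        d.modify p.1 ([] : List String) ((fun (p : String × String) (l : List String) => l ++ [p.2]) p)) PySem.Dict.empty).keys = _
    rw [PySem.Dict.keys_foldl_modify_key]
    rw [PySem.Dict.keys_empty, PySem.Set.update_nil_left]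
    have : ps.map Prod.fst = cs.flatMap (fun c => c.keys) := by
      rw [hps, List.map_flatMap]; rfl
    rw [this, PySem.List.dedup_eq_ofList]
  have hnodup : D.keys.Nodup := by
    rw [hkeys]; exact PySem.List.nodup_dedup _
  -- items of the accumulated dict, keyed column by column
  have hitems : D.items = D.keys.map (fun k => (k, D.getD k [])) := by
    have hk : D.keys = D.items.map Prod.fst := rfl
    rw [hk, List.map_map]
    conv_lhs => rw [← List.map_id D.items]
    refine (List.map_congr_left (fun p hp => ?_)).symm
    have := PySem.Dict.getD_of_mem_items D hp hnodup []
    simp [Function.comp, this]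
  -- each column's value list
  have hget : ∀ k, D.getD k [] = (cs.filter (fun c => c.contains k)).map (fun c => c.getD k "") := by
    intro k
    have h1 : D.getD k [] = (ps.filter (fun p => p.1 == k)).map Prod.snd := by
      rw [hD]
      show (ps.foldl (fun d (p : String × String) => d.modify p.1 [] (· ++ [p.2])) PySem.Dict.empty).getD k [] = _
      rw [PySem.Dict.getD_foldl_modify_append, PySem.Dict.getD_empty]
      simp
    rw [h1, hps]
    exact pv_cols cs hcn k
  show D.items = _
  dsimp only
  rw [hitems, hkeys]
  exact List.map_congr_left (fun k _ => by rw [hget k])
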